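-- pv_equiv track=rewrite | github.com/lufftw/neetcode | solutions/2157_groups_of_strings.py | _reference
-- ===== SOURCE A (Python) =====
-- from typing import List
--
-- def _reference(words: List[str]) -> List[int]:
--     """Reference implementation using Union-Find."""
--     n = len(words)
--     parent = list(range(n))
--     size = [1] * n
--
--     def find(x):
--         if parent[x] != x:
--             parent[x] = find(parent[x])
--         return parent[x]
--
--     def union(x, y):
--         px, py = find(x), find(y)
--         if px != py:
--             parent[py] = px
--             size[px] += size[py]
--
--     masks = [sum(1 << (ord(c) - ord('a')) for c in w) for w in words]
--     mask_to_idx = {}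
--     delete_to_idx = {}
--
--     for i, mask in enumerate(masks):
--         if mask in mask_to_idx:
--             union(i, mask_to_idx[mask])
--         else:
--             mask_to_idx[mask] = i
--
--         for b in range(26):
--             if mask & (1 << b):
--                 del_mask = mask ^ (1 << b)
--                 if del_mask in mask_to_idx:
--                     union(i, mask_to_idx[del_mask])
--                 if del_mask in delete_to_idx:
--                     union(i, delete_to_idx[del_mask])
--                 else:
--                     delete_to_idx[del_mask] = i
--
--     num_groups = sum(1 for i in range(n) if find(i) == i)
--     max_size = max((size[i] for i in range(n) if find(i) == i), default=0)
--     return [num_groups, max_size]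
-- ===== SOURCE B (Python) =====
-- from typing import List
--
-- def _reference(words: List[str]) -> List[int]:
--     """Two-phase: collect merge edges via first-occurrence buckets, then
--     quick-find label relabelling and a counting dict (no union-find)."""
--     masks = [sum(1 << (ord(c) - ord('a')) for c in w) for w in words]
--     mask_to_idx = {}
--     delete_to_idx = {}
--     edges = []
--     for i, mask in enumerate(masks):
--         j = mask_to_idx.setdefault(mask, i)
--         if j != i:
--             edges.append((i, j))
--         for b in range(26):
--             if mask >> b & 1:
--                 d = mask ^ (1 << b)
--                 if d in mask_to_idx:
--                     edges.append((i, mask_to_idx[d]))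
--                 j = delete_to_idx.setdefault(d, i)
--                 if j != i:
--                     edges.append((i, j))
--     comp = list(range(len(words)))
--     for x, y in edges:
--         cx, cy = comp[x], comp[y]
--         if cx != cy:
--             comp = [cx if c == cy else c for c in comp]
--     counts = {}
--     for c in comp:
--         counts[c] = counts.get(c, 0) + 1
--     return [len(counts), max(counts.values(), default=0)]
-- ===== Notes on version B (the rewrite author's own statement) =====
-- stated objective: alternative
-- what changed: Replaces the interleaved path-compressed union-find with a two-phase algorithm: first collect the merge edges from the same first-occurrence bucket dicts, then compute components by quick-find label relabelling over the edge list and tally group sizes with a counting dict.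
import Mathlib
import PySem

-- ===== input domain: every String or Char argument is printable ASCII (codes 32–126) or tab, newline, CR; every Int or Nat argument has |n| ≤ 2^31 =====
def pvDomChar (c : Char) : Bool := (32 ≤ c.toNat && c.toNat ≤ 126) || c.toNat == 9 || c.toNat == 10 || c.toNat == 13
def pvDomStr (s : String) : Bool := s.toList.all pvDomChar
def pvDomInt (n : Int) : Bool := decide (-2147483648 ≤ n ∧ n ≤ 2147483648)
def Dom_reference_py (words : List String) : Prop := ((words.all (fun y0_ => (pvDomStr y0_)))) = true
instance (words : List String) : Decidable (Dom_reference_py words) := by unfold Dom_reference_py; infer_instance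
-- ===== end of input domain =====

-- B replaces A's interleaved path-compressed union-find by a two-phase algorithm (collect merge
-- edges via the same first-occurrence bucket dicts, then quick-find label relabelling and a
-- counting dict); objective: alternative structure, not speed.

-- ===== PORT A =====
-- shared helper: masks = [sum(1 << (ord(c) - ord('a')) for c in w) for w in words]
-- (both Pythons contain this identical line; Nat subtraction is exact under Pre_, where ord(c) ≥ 97)
def pvMask (w : String) : Nat := (w.toList.map (fun c => 1 <<< (c.toNat - 97))).sum

-- find(x) with path compression; fuel (≥ path length on every state A reaches) makes the
-- recursion structural, the returned list is the mutated `parent`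
def pvFind (p : List Nat) : Nat → Nat → List Nat × Nat
  | 0, x => (p, x)
  | f+1, x =>
    let px := p.getD x x
    if px = x then (p, x)
    else
      let r := pvFind p f px
      (r.1.set x r.2, r.2)

def pvUnion (st : List Nat × List Int) (x y : Nat) : List Nat × List Int :=
  let f1 := pvFind st.1 st.1.length x
  let f2 := pvFind f1.1 f1.1.length y
  if f1.2 ≠ f2.2 then
    (f2.1.set f2.2 f1.2, st.2.set f1.2 (st.2.getD f1.2 0 + st.2.getD f2.2 0))
  else (f2.1, st.2)

abbrev PvStA := (List Nat × List Int) × PySem.Dict Nat Nat × PySem.Dict Nat Nat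

-- body of `for b in range(26): ...`
def pvBitA (i mask : Nat) (st : PvStA) (b : Nat) : PvStA :=
  if mask &&& (1 <<< b) ≠ 0 then
    let d := mask ^^^ (1 <<< b)
    let s1 : List Nat × List Int :=
      match st.2.1.get? d with
      | some j => pvUnion st.1 i j
      | none => st.1
    match st.2.2.get? d with
    | some j => (pvUnion s1 i j, st.2.1, st.2.2)
    | none => (s1, st.2.1, st.2.2.insert d i)
  else st

-- body of `for i, mask in enumerate(masks): ...` (the loop runs over i = 0..n-1; mask = masks[i])
def pvWordA (masks : List Nat) (st : PvStA) (i : Nat) : PvStA :=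
  let mask := masks.getD i 0
  let st1 : PvStA :=
    match st.2.1.get? mask with
    | some j => (pvUnion st.1 i j, st.2.1, st.2.2)
    | none => (st.1, st.2.1.insert mask i, st.2.2)
  (List.range 26).foldl (pvBitA i mask) st1

def reference_py (words : List String) : List Int :=
  let n := words.length
  let masks := words.map pvMask
  let st := (List.range n).foldl (pvWordA masks)
      ((List.range n, List.replicate n (1 : Int)), PySem.Dict.empty, PySem.Dict.empty)
  let p := st.1.1
  let sz := st.1.2
  -- num_groups = sum(1 for i in range(n) if find(i) == i)  (find keeps mutating parent)
  let c := (List.range n).foldl (fun acc i =>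
      let f := pvFind acc.1 acc.1.length i
      (f.1, if f.2 = i then acc.2 + 1 else acc.2)) (p, (0 : Int))
  -- max_size = max((size[i] for i in range(n) if find(i) == i), default=0); sizes are ≥ 1,
  -- so Python's max-with-default is the running max from 0
  let m := (List.range n).foldl (fun acc i =>
      let f := pvFind acc.1 acc.1.length i
      (f.1, if f.2 = i then max acc.2 (sz.getD i 0) else acc.2)) (c.1, (0 : Int))
  [c.2, m.2]

-- ===== PORT B =====
abbrev PvStB := PySem.Dict Nat Nat × PySem.Dict Nat Nat × List (Nat × Nat)

-- j = d.setdefault(k, v) (returns the dict and the looked-up/inserted value)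
def pvSetdefault (d : PySem.Dict Nat Nat) (k v : Nat) : PySem.Dict Nat Nat × Nat :=
  match d.get? k with
  | some j => (d, j)
  | none => (d.insert k v, v)

def pvBitB (i mask : Nat) (st : PvStB) (b : Nat) : PvStB :=
  if mask >>> b &&& 1 = 1 then
    let d := mask ^^^ (1 <<< b)
    let es1 : List (Nat × Nat) :=
      match st.1.get? d with
      | some j => st.2.2 ++ [(i, j)]
      | none => st.2.2
    let sd := pvSetdefault st.2.1 d i
    if sd.2 ≠ i then (st.1, sd.1, es1 ++ [(i, sd.2)])
    else (st.1, sd.1, es1)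
  else st

def pvWordB (masks : List Nat) (st : PvStB) (i : Nat) : PvStB :=
  let mask := masks.getD i 0
  let sd := pvSetdefault st.1 mask i
  let es := if sd.2 ≠ i then st.2.2 ++ [(i, sd.2)] else st.2.2
  (List.range 26).foldl (pvBitB i mask) (sd.1, st.2.1, es)

-- quick-find merge step: comp = [cx if c == cy else c for c in comp]
def pvApplyEdge (comp : List Nat) (e : Nat × Nat) : List Nat :=
  let cx := comp.getD e.1 0
  let cy := comp.getD e.2 0
  if cx = cy then comp else comp.map (fun c => if c = cy then cx else c)

def reference_py_alt (words : List String) : List Int :=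
  let masks := words.map pvMask
  let st := (List.range words.length).foldl (pvWordB masks)
      (PySem.Dict.empty, PySem.Dict.empty, [])
  let comp := st.2.2.foldl pvApplyEdge (List.range words.length)
  let counts := comp.foldl (fun d c => d.insert c (d.getD c 0 + 1))
      (PySem.Dict.empty : PySem.Dict Nat Int)
  [(counts.items.length : Int), counts.values.foldl max 0]

-- ===== PRECONDITION & SPEC =====
-- Pre_ excludes exactly the inputs where A raises: a character below 'a' makes
-- `1 << (ord(c) - ord('a'))` a negative shift, a ValueError.
def Pre_reference_py (words : List String) : Prop :=
  (words.all (fun w => w.toList.all (fun c => 97 ≤ c.toNat))) = true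
instance (words : List String) : Decidable (Pre_reference_py words) := by
  unfold Pre_reference_py; infer_instance

def pvWitness_reference_py : List String := ["ab", "a", "zzz"]

def Spec_reference_py (words : List String) (out : List Int) : Prop := out = reference_py_alt words
instance (words : List String) (out : List Int) : Decidable (Spec_reference_py words out) := by
  unfold Spec_reference_py; infer_instance

-- ===== CLAIM (what is proved, stated in full; the proofs are below) =====
def Claim_equal_reference_py : Prop :=
  ∀ (words : List String), Dom_reference_py words → Pre_reference_py words →
    Spec_reference_py words (reference_py words)

-- ===== LEMMAS AND PROOFS =====

def pvChase (p : List Nat) : Nat → Nat → Option Nat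
  | 0, x => if p.getD x x = x then some x else none
  | f+1, x => if p.getD x x = x then some x else pvChase p f (p.getD x x)

def pvNR (p : List Nat) : Nat :=
  ((List.range p.length).filter (fun x => p.getD x x != x)).length

def pvRoot (p : List Nat) (x : Nat) : Nat := (pvChase p p.length x).getD x

lemma pvSet_getD_self {α : Type} {p : List α} {x : Nat} (r d : α) (hx : x < p.length) :
    (p.set x r).getD x d = r := by
  simp [List.getD_eq_getElem?_getD, hx]

lemma pvSet_getD_ne {α : Type} {p : List α} {x y : Nat} (r d : α) (hxy : y ≠ x) :
    (p.set x r).getD y d = p.getD y d := by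
  simp [List.getD_eq_getElem?_getD, List.getElem?_set_ne (by omega : x ≠ y)]

lemma pvChase_zero (p : List Nat) (x : Nat) :
    pvChase p 0 x = if p.getD x x = x then some x else none := rfl

lemma pvChase_succ (p : List Nat) (f x : Nat) :
    pvChase p (f+1) x = if p.getD x x = x then some x else pvChase p f (p.getD x x) := rfl

lemma pvChase_of_root {p : List Nat} {x : Nat} (h : p.getD x x = x) (f : Nat) :
    pvChase p f x = some x := by
  cases f
  · rw [pvChase_zero, if_pos h]
  · rw [pvChase_succ, if_pos h]

lemma pvChase_root_out {p : List Nat} {f x r : Nat} (h : pvChase p f x = some r) :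
    p.getD r r = r := by
  induction f generalizing x with
  | zero =>
    rw [pvChase_zero] at h; split at h
    · cases h; assumption
    · cases h
  | succ f ih =>
    rw [pvChase_succ] at h; split at h
    · cases h; assumption
    · exact ih h

lemma pvChase_mono {p : List Nat} {f g x r : Nat} (h : pvChase p f x = some r) (hfg : f ≤ g) :
    pvChase p g x = some r := by
  induction f generalizing x g with
  | zero =>
    rw [pvChase_zero] at h; split at h
    · cases h; exact pvChase_of_root (by assumption) g
    · cases h
  | succ f ih =>
    rw [pvChase_succ] at h; split at h
    · cases h; exact pvChase_of_root (by assumption) g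
    · rename_i hnr
      cases g with
      | zero => omega
      | succ g =>
        rw [pvChase_succ, if_neg hnr]
        exact ih h (Nat.le_of_succ_le_succ hfg)

lemma pvChase_unique {p : List Nat} {f g x r s : Nat}
    (h1 : pvChase p f x = some r) (h2 : pvChase p g x = some s) : r = s := by
  rcases Nat.le_total f g with hle | hle
  · rw [pvChase_mono h1 hle] at h2; cases h2; rfl
  · rw [pvChase_mono h2 hle] at h1; cases h1; rfl

lemma pvChase_lt {p : List Nat} (hb : ∀ y, y < p.length → p.getD y y < p.length)
    {f x r : Nat} (hx : x < p.length) (h : pvChase p f x = some r) : r < p.length := by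
  induction f generalizing x with
  | zero =>
    rw [pvChase_zero] at h; split at h
    · cases h; exact hx
    · cases h
  | succ f ih =>
    rw [pvChase_succ] at h; split at h
    · cases h; exact hx
    · exact ih (hb x hx) h

-- preservation of chases under a path-compression write p.set x r (r the root of x)
lemma pvChase_set {p : List Nat} {x r fx : Nat} (hr : pvChase p fx x = some r) :
    ∀ f y s, pvChase p f y = some s → pvChase (p.set x r) f y = some s := by
  by_cases hx : x < p.length
  case neg =>
    rw [List.set_eq_of_length_le (by omega)]
    intro _ _ _ h; exact h
  intro f
  induction f with
  | zero =>
    intro y s h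
    rw [pvChase_zero] at h; split at h
    · cases h
      rename_i hy
      by_cases hxy : y = x
      · subst hxy
        have hrx : r = y := pvChase_unique hr (pvChase_of_root hy fx)
        subst hrx
        rw [pvChase_zero, if_pos (pvSet_getD_self _ _ hx)]
      · rw [pvChase_zero, pvSet_getD_ne _ _ hxy, if_pos hy]
    · cases h
  | succ f ih =>
    intro y s h
    rw [pvChase_succ] at h; split at h
    · cases h
      rename_i hy
      by_cases hxy : y = x
      · subst hxy
        have hrx : r = y := pvChase_unique hr (pvChase_of_root hy fx)
        subst hrx
        exact pvChase_of_root (pvSet_getD_self _ _ hx) _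
      · exact pvChase_of_root (by rw [pvSet_getD_ne _ _ hxy]; exact hy) _
    · rename_i hny
      by_cases hxy : y = x
      · subst hxy
        have hfull : pvChase p (f+1) y = some s := by
          rw [pvChase_succ, if_neg hny]; exact h
        have hs : s = r := pvChase_unique hfull hr
        subst hs
        have hrx : s ≠ y := by
          intro hq; subst hq; exact hny (pvChase_root_out hr)
        rw [pvChase_succ, pvSet_getD_self _ _ hx, if_neg (by omega)]
        have hroot : (p.set y s).getD s s = s := by
          rw [pvSet_getD_ne _ _ hrx]; exact pvChase_root_out hr
        exact pvChase_of_root hroot f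
      · have hgd : (p.set x r).getD y y = p.getD y y := pvSet_getD_ne _ _ hxy
        rw [pvChase_succ, hgd, if_neg hny]
        exact ih _ _ h

-- the set of fixpoints (roots) is unchanged by a compression write
lemma pvRoots_set {p : List Nat} {x r fx : Nat} (hr : pvChase p fx x = some r) :
    ∀ y, (p.set x r).getD y y = y ↔ p.getD y y = y := by
  intro y
  by_cases hx : x < p.length
  · by_cases hxy : y = x
    · subst hxy
      rw [pvSet_getD_self _ _ hx]
      constructor
      · intro hry
        rw [← hry] at hr
        exact hry ▸ pvChase_root_out hr
      · intro hy
        exact pvChase_unique hr (pvChase_of_root hy fx)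
    · rw [pvSet_getD_ne _ _ hxy]
  · rw [List.set_eq_of_length_le (by omega)]

lemma pvNR_congr {p q : List Nat} (hl : q.length = p.length)
    (h : ∀ y, q.getD y y = y ↔ p.getD y y = y) : pvNR q = pvNR p := by
  unfold pvNR
  rw [hl]
  congr 1
  apply List.filter_congr
  intro y _
  show (q.getD y y != y) = (p.getD y y != y)
  by_cases hy : p.getD y y = y
  · have h1 : (q.getD y y != y) = false := bne_eq_false_iff_eq.mpr ((h y).mpr hy)
    have h2 : (p.getD y y != y) = false := bne_eq_false_iff_eq.mpr hy
    rw [h1, h2]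
  · have hq : q.getD y y ≠ y := fun c => hy ((h y).mp c)
    have h1 : (q.getD y y != y) = true := bne_iff_ne.mpr hq
    have h2 : (p.getD y y != y) = true := bne_iff_ne.mpr hy
    rw [h1, h2]

-- q is reachable from p by compression writes: chases are preserved, lengths, roots, bounds
def pvEquiv (p q : List Nat) : Prop :=
  q.length = p.length ∧
  (∀ f y s, pvChase p f y = some s → pvChase q f y = some s) ∧
  (∀ y, q.getD y y = y ↔ p.getD y y = y) ∧
  ((∀ y, y < p.length → p.getD y y < p.length) →
    ∀ y, y < p.length → q.getD y y < p.length)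

lemma pvEquiv_refl (p : List Nat) : pvEquiv p p :=
  ⟨rfl, fun _ _ _ h => h, fun _ => Iff.rfl, fun hb => hb⟩

lemma pvEquiv_trans {p q r : List Nat} (h1 : pvEquiv p q) (h2 : pvEquiv q r) : pvEquiv p r := by
  obtain ⟨l1, c1, r1, b1⟩ := h1
  obtain ⟨l2, c2, r2, b2⟩ := h2
  refine ⟨l2.trans l1, fun f y s h => c2 f y s (c1 f y s h), fun y => (r2 y).trans (r1 y), ?_⟩
  intro hb y hy
  have h2' : ∀ z, z < q.length → q.getD z z < q.length := by
    intro z hz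
    rw [l1] at hz ⊢
    exact b1 hb z hz
  have := b2 h2' y (by rw [l1]; exact hy)
  rw [l1] at this
  exact this

lemma pvFind_succ (p : List Nat) (f x : Nat) :
    pvFind p (f+1) x = if p.getD x x = x then (p, x)
      else ((pvFind p f (p.getD x x)).1.set x (pvFind p f (p.getD x x)).2,
            (pvFind p f (p.getD x x)).2) := by
  show (let px := p.getD x x; _) = _
  by_cases h : p.getD x x = x <;> simp [pvFind, h]

lemma pvFind_of_root {p : List Nat} {x : Nat} (h : p.getD x x = x) (g : Nat) :
    pvFind p g x = (p, x) := by
  cases g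
  · rfl
  · rw [pvFind_succ, if_pos h]

lemma pvFind_spec {p : List Nat} {f x r : Nat} (h : pvChase p f x = some r) :
    ∀ g, f ≤ g → (pvFind p g x).2 = r ∧ pvEquiv p (pvFind p g x).1 := by
  induction f generalizing x with
  | zero =>
    rw [pvChase_zero] at h; split at h
    · cases h
      intro g _
      rw [pvFind_of_root (by assumption) g]
      exact ⟨rfl, pvEquiv_refl p⟩
    · cases h
  | succ f ih =>
    rw [pvChase_succ] at h; split at h
    · cases h
      intro g _
      rw [pvFind_of_root (by assumption) g]
      exact ⟨rfl, pvEquiv_refl p⟩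
    · rename_i hnr
      intro g hg
      cases g with
      | zero => omega
      | succ g =>
        have hx : x < p.length := by
          by_contra hc
          exact hnr (by simp [List.getD_eq_getElem?_getD, List.getElem?_eq_none (by omega : p.length ≤ x)])
        obtain ⟨hsnd, hequiv⟩ := ih h g (Nat.le_of_succ_le_succ hg)
        rw [pvFind_succ, if_neg hnr]
        have hchq : pvChase (pvFind p g (p.getD x x)).1 (f+1) x = some (pvFind p g (p.getD x x)).2 := by
          apply hequiv.2.1
          rw [pvChase_succ, if_neg hnr, hsnd]; exact h
        refine ⟨hsnd, ?_⟩
        refine pvEquiv_trans hequiv ⟨?_, ?_, ?_, ?_⟩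
        · rw [List.length_set]
        · exact fun ff y s hs => pvChase_set hchq ff y s hs
        · exact fun y => pvRoots_set hchq y
        · intro hb y hy
          have hxq : x < (pvFind p g (p.getD x x)).1.length := by rw [hequiv.1]; exact hx
          by_cases hyx : y = x
          · subst hyx
            rw [pvSet_getD_self _ _ hxq]
            exact pvChase_lt hb hxq hchq
          · rw [pvSet_getD_ne _ _ hyx]
            exact hb y hy

def pvGood (n : Nat) (p : List Nat) : Prop :=
  p.length = n ∧ (∀ y, y < n → p.getD y y < n) ∧ (∀ y, y < n → (pvChase p (pvNR p) y).isSome)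

def pvInv (n : Nat) (p : List Nat) (sz : List Int) (comp : List Nat) : Prop :=
  pvGood n p ∧ sz.length = n ∧ comp.length = n ∧
  (∀ x, x < n → comp.getD x 0 = comp.getD (pvRoot p x) 0) ∧
  (∀ x y, x < n → y < n → p.getD x x = x → p.getD y y = y →
      comp.getD x 0 = comp.getD y 0 → x = y) ∧
  (∀ x, x < n → p.getD x x = x → sz.getD x 0 = (comp.count (comp.getD x 0) : Int))

lemma pvNR_le (p : List Nat) : pvNR p ≤ p.length := by
  unfold pvNR
  calc ((List.range p.length).filter _).length ≤ (List.range p.length).length :=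
        List.length_filter_le _ _
    _ = p.length := List.length_range

lemma pvGood_equiv {n : Nat} {p q : List Nat} (hg : pvGood n p) (he : pvEquiv p q) :
    pvGood n q := by
  obtain ⟨hl, hb, hs⟩ := hg
  subst hl
  obtain ⟨hl', hc, hrts, hbnd⟩ := he
  have hnr : pvNR q = pvNR p := pvNR_congr hl' hrts
  refine ⟨hl', ?_, ?_⟩
  · exact hbnd hb
  · intro y hy
    obtain ⟨s, hsome⟩ := Option.isSome_iff_exists.mp (hs y hy)
    rw [hnr]
    exact Option.isSome_iff_exists.mpr ⟨s, hc _ _ _ hsome⟩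

lemma pvRoot_spec {n : Nat} {p : List Nat} (hg : pvGood n p) {y : Nat} (hy : y < n) :
    pvChase p p.length y = some (pvRoot p y) := by
  obtain ⟨s, hsome⟩ := Option.isSome_iff_exists.mp (hg.2.2 y hy)
  have h2 := pvChase_mono hsome (pvNR_le p)
  have h3 : pvRoot p y = s := by rw [pvRoot, h2]; rfl
  rw [h3]; exact h2

lemma pvRoot_lt {n : Nat} {p : List Nat} (hg : pvGood n p) {y : Nat} (hy : y < n) :
    pvRoot p y < n := by
  have := pvChase_lt (p := p) (fun z hz => by rw [hg.1] at hz ⊢; exact hg.2.1 z hz)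
    (by rw [hg.1]; exact hy) (pvRoot_spec hg hy)
  rw [hg.1] at this; exact this

lemma pvRoot_root {n : Nat} {p : List Nat} (hg : pvGood n p) {y : Nat} (hy : y < n) :
    p.getD (pvRoot p y) (pvRoot p y) = pvRoot p y :=
  pvChase_root_out (pvRoot_spec hg hy)

lemma pvRoot_eq_self_iff {n : Nat} {p : List Nat} (hg : pvGood n p) {y : Nat} (hy : y < n) :
    pvRoot p y = y ↔ p.getD y y = y := by
  constructor
  · intro h
    have := pvRoot_root hg hy
    rw [h] at this; exact this
  · intro h
    exact pvChase_unique (pvRoot_spec hg hy) (pvChase_of_root h p.length)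

lemma pvRoot_equiv {n : Nat} {p q : List Nat} (hg : pvGood n p) (he : pvEquiv p q)
    {y : Nat} (hy : y < n) : pvRoot q y = pvRoot p y := by
  have h1 := pvRoot_spec hg hy
  have h2 : pvChase q q.length y = some (pvRoot p y) := by
    rw [he.1]; exact he.2.1 _ _ _ h1
  show (pvChase q q.length y).getD y = pvRoot p y
  rw [h2]; rfl

-- linking two roots: py's tree is hung under px; every chase result is renamed py ↦ px
lemma pvChase_link {p : List Nat} {px py : Nat} (hpx : p.getD px px = px)
    (hpy : p.getD py py = py) (hne : px ≠ py) (hpylen : py < p.length) :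
    ∀ f y s, pvChase p f y = some s →
      pvChase (p.set py px) (f+1) y = some (if s = py then px else s) := by
  intro f
  induction f with
  | zero =>
    intro y s h
    rw [pvChase_zero] at h; split at h
    · cases h
      rename_i hy
      by_cases hxy : y = py
      · subst hxy
        rw [if_pos rfl, pvChase_succ, pvSet_getD_self _ _ hpylen, if_neg (by omega)]
        rw [pvChase_zero, pvSet_getD_ne _ _ hne, if_pos hpx]
      · rw [if_neg hxy]
        exact pvChase_of_root (by rw [pvSet_getD_ne _ _ hxy]; exact hy) _
    · cases h
  | succ f ih =>
    intro y s h
    rw [pvChase_succ] at h; split at h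
    · cases h
      rename_i hy
      by_cases hxy : y = py
      · subst hxy
        rw [if_pos rfl, pvChase_succ, pvSet_getD_self _ _ hpylen, if_neg (by omega)]
        exact pvChase_of_root (by rw [pvSet_getD_ne _ _ hne]; exact hpx) _
      · rw [if_neg hxy]
        exact pvChase_of_root (by rw [pvSet_getD_ne _ _ hxy]; exact hy) _
    · rename_i hny
      have hxy : y ≠ py := fun c => hny (c ▸ hpy)
      rw [pvChase_succ, pvSet_getD_ne _ _ hxy, if_neg hny]
      exact ih _ _ h

lemma pvCountP_update_one {α : Type} [DecidableEq α] {l : List α} {q q' : α → Bool} {t : α}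
    (hq : ∀ z ∈ l, z ≠ t → q' z = q z) (hqt : q t = false) (hq't : q' t = true) :
    l.countP q' = l.countP q + l.count t := by
  induction l with
  | nil => simp
  | cons a l ih =>
    have ih' := ih (fun z hz => hq z (List.mem_cons_of_mem a hz))
    by_cases hat : a = t
    · subst hat
      rw [List.countP_cons, List.countP_cons, List.count_cons_self, hq't, hqt, ih']
      simp; omega
    · rw [List.countP_cons, List.countP_cons, List.count_cons_of_ne hat,
        hq a (List.mem_cons_self) hat, ih']
      omega

lemma pvNR_link {p : List Nat} {px py : Nat} (hpy : p.getD py py = py)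
    (hpylen : py < p.length) (hne : px ≠ py) :
    pvNR (p.set py px) = pvNR p + 1 := by
  unfold pvNR
  rw [List.length_set, ← List.countP_eq_length_filter, ← List.countP_eq_length_filter]
  have hupd := pvCountP_update_one (l := List.range p.length)
      (q := fun x => p.getD x x != x)
      (q' := fun x => (p.set py px).getD x x != x) (t := py)
      (fun z _ hz => by show ((p.set py px).getD z z != z) = (p.getD z z != z);
                        rw [pvSet_getD_ne _ _ hz])
      (bne_eq_false_iff_eq.mpr hpy)
      (bne_iff_ne.mpr (by rw [pvSet_getD_self _ _ hpylen]; omega))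
  rw [hupd, List.count_eq_one_of_mem List.nodup_range (List.mem_range.mpr hpylen)]

lemma pvNR_lt_of_root {p : List Nat} {t : Nat} (ht : t < p.length)
    (hroot : p.getD t t = t) : pvNR p < p.length := by
  unfold pvNR
  calc ((List.range p.length).filter _).length < (List.range p.length).length := by
        apply List.length_filter_lt_length_iff_exists.mpr
        exact ⟨t, List.mem_range.mpr ht, fun hc => (bne_iff_ne.mp hc) hroot⟩
    _ = p.length := List.length_range

lemma pvGood_link {n : Nat} {p : List Nat} {px py : Nat} (hg : pvGood n p)
    (hpx : p.getD px px = px) (hpy : p.getD py py = py) (hne : px ≠ py)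
    (hpxn : px < n) (hpyn : py < n) : pvGood n (p.set py px) := by
  obtain ⟨hl, hb, hs⟩ := hg
  have hpylen : py < p.length := by omega
  refine ⟨by rw [List.length_set]; exact hl, ?_, ?_⟩
  · intro y hy
    by_cases hyp : y = py
    · subst hyp; rw [pvSet_getD_self _ _ hpylen]; exact hpxn
    · rw [pvSet_getD_ne _ _ hyp]; exact hb y hy
  · intro y hy
    obtain ⟨s, hsome⟩ := Option.isSome_iff_exists.mp (hs y hy)
    rw [pvNR_link hpy hpylen hne]
    exact Option.isSome_iff_exists.mpr ⟨_, pvChase_link hpx hpy hne hpylen _ _ _ hsome⟩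

lemma pvRoot_link {n : Nat} {p : List Nat} {px py : Nat} (hg : pvGood n p)
    (hpx : p.getD px px = px) (hpy : p.getD py py = py) (hne : px ≠ py)
    (hpxn : px < n) (hpyn : py < n) :
    ∀ z, z < n → pvRoot (p.set py px) z = if pvRoot p z = py then px else pvRoot p z := by
  intro z hz
  have hpylen : py < p.length := by rw [hg.1]; exact hpyn
  obtain ⟨s, hsome⟩ := Option.isSome_iff_exists.mp (hg.2.2 z hz)
  have hs : s = pvRoot p z :=
    pvChase_unique (pvChase_mono hsome (pvNR_le p)) (pvRoot_spec hg hz)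
  subst hs
  have hlink := pvChase_link hpx hpy hne hpylen _ _ _ hsome
  have hfuel : pvNR p + 1 ≤ (p.set py px).length := by
    rw [List.length_set]
    exact pvNR_lt_of_root hpylen hpy
  have := pvChase_mono hlink hfuel
  show (pvChase (p.set py px) (p.set py px).length z).getD z = _
  rw [this]; rfl

lemma pvGetD_map_replace {comp : List Nat} (cx cy : Nat) {z : Nat} (hz : z < comp.length) :
    (comp.map (fun c => if c = cy then cx else c)).getD z 0 =
      if comp.getD z 0 = cy then cx else comp.getD z 0 := by
  rw [List.getD_eq_getElem?_getD, List.getElem?_map,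
      List.getElem?_eq_getElem hz, List.getD_eq_getElem?_getD, List.getElem?_eq_getElem hz]
  rfl

lemma pvCount_replace_target {l : List Nat} {cx cy : Nat} (h : cx ≠ cy) :
    (l.map (fun c => if c = cy then cx else c)).count cx = l.count cx + l.count cy := by
  induction l with
  | nil => simp
  | cons a l ih =>
    by_cases hac : a = cy <;> by_cases hax : a = cx <;>
      simp [List.count_cons, ih, hac, hax, h, Ne.symm h] <;> omega

lemma pvCount_replace_other {l : List Nat} {cx cy v : Nat} (hvx : v ≠ cx) (hvy : v ≠ cy) :
    (l.map (fun c => if c = cy then cx else c)).count v = l.count v := by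
  induction l with
  | nil => simp
  | cons a l ih =>
    by_cases hac : a = cy <;> by_cases hav : a = v <;>
      simp [List.count_cons, ih, hac, hav, hvx, hvy, Ne.symm hvx, Ne.symm hvy] <;> omega

lemma pvInv_equiv {n : Nat} {p q : List Nat} {sz : List Int} {comp : List Nat}
    (h : pvInv n p sz comp) (he : pvEquiv p q) : pvInv n q sz comp := by
  obtain ⟨hg, hsz, hcl, hc6, hc7, hc8⟩ := h
  refine ⟨pvGood_equiv hg he, hsz, hcl, ?_, ?_, ?_⟩
  · intro z hz
    rw [pvRoot_equiv hg he hz]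
    exact hc6 z hz
  · intro z w hz hw hrz hrw
    exact hc7 z w hz hw ((he.2.2.1 z).mp hrz) ((he.2.2.1 w).mp hrw)
  · intro z hz hrz
    exact hc8 z hz ((he.2.2.1 z).mp hrz)

lemma pvUnion_eq {n : Nat} {p : List Nat} {sz : List Int} {comp : List Nat} {x y : Nat}
    (h : pvInv n p sz comp) (hx : x < n) (hy : y < n) :
    ∃ p2, pvEquiv p p2 ∧
      pvUnion (p, sz) x y = (if pvRoot p x ≠ pvRoot p y
          then (p2.set (pvRoot p y) (pvRoot p x),
                sz.set (pvRoot p x) (sz.getD (pvRoot p x) 0 + sz.getD (pvRoot p y) 0))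
          else (p2, sz)) := by
  have hg := h.1
  have hnr1 : pvNR p ≤ p.length := pvNR_le p
  obtain ⟨s1, hs1⟩ := Option.isSome_iff_exists.mp (hg.2.2 x hx)
  have hs1' : s1 = pvRoot p x :=
    pvChase_unique (pvChase_mono hs1 hnr1) (pvRoot_spec hg hx)
  obtain ⟨hf1snd, hf1eq⟩ := pvFind_spec (hs1' ▸ hs1) p.length hnr1
  have hg1 : pvGood n (pvFind p p.length x).1 := pvGood_equiv hg hf1eq
  have hlen1 : (pvFind p p.length x).1.length = p.length := hf1eq.1
  obtain ⟨s2, hs2⟩ := Option.isSome_iff_exists.mp (hg1.2.2 y hy)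
  have hs2' : s2 = pvRoot (pvFind p p.length x).1 y :=
    pvChase_unique (pvChase_mono hs2 (pvNR_le _)) (pvRoot_spec hg1 hy)
  obtain ⟨hf2snd, hf2eq⟩ := pvFind_spec (hs2' ▸ hs2) (pvFind p p.length x).1.length (pvNR_le _)
  have hroot2 : pvRoot (pvFind p p.length x).1 y = pvRoot p y := pvRoot_equiv hg hf1eq hy
  refine ⟨(pvFind (pvFind p p.length x).1 (pvFind p p.length x).1.length y).1,
    pvEquiv_trans hf1eq hf2eq, ?_⟩
  show (let f1 := pvFind p p.length x; _) = _
  simp only [pvUnion, hf1snd, hf2snd, hroot2]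

lemma pvStep_inv {n : Nat} {p : List Nat} {sz : List Int} {comp : List Nat} {x y : Nat}
    (h : pvInv n p sz comp) (hx : x < n) (hy : y < n) :
    pvInv n (pvUnion (p, sz) x y).1 (pvUnion (p, sz) x y).2 (pvApplyEdge comp (x, y)) := by
  obtain ⟨p2, he, hu⟩ := pvUnion_eq h hx hy
  have hg := h.1
  have inv2 : pvInv n p2 sz comp := pvInv_equiv h he
  have hg2 : pvGood n p2 := inv2.1
  have hsz : sz.length = n := h.2.1
  have hcl : comp.length = n := h.2.2.1
  have hrx2 : p2.getD (pvRoot p x) (pvRoot p x) = pvRoot p x :=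
    (he.2.2.1 _).mpr (pvRoot_root hg hx)
  have hry2 : p2.getD (pvRoot p y) (pvRoot p y) = pvRoot p y :=
    (he.2.2.1 _).mpr (pvRoot_root hg hy)
  have hrxn : pvRoot p x < n := pvRoot_lt hg hx
  have hryn : pvRoot p y < n := pvRoot_lt hg hy
  have hr2x : pvRoot p2 x = pvRoot p x := pvRoot_equiv hg he hx
  have hr2y : pvRoot p2 y = pvRoot p y := pvRoot_equiv hg he hy
  have hcx : comp.getD (pvRoot p x) 0 = comp.getD x 0 := by
    have := inv2.2.2.2.1 x hx; rw [hr2x] at this; exact this.symm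
  have hcy : comp.getD (pvRoot p y) 0 = comp.getD y 0 := by
    have := inv2.2.2.2.1 y hy; rw [hr2y] at this; exact this.symm
  have hkey : comp.getD x 0 = comp.getD y 0 ↔ pvRoot p x = pvRoot p y := by
    constructor
    · intro hcc
      exact inv2.2.2.2.2.1 _ _ hrxn hryn hrx2 hry2 (by rw [hcx, hcy, hcc])
    · intro hrr
      rw [← hcx, ← hcy, hrr]
  by_cases hreq : pvRoot p x = pvRoot p y
  · rw [hu, if_neg (by omega)]
    have happ : pvApplyEdge comp (x, y) = comp := by
      unfold pvApplyEdge
      rw [if_pos (hkey.mpr hreq)]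
    rw [happ]
    exact inv2
  · have hcne : comp.getD x 0 ≠ comp.getD y 0 := fun c => hreq (hkey.mp c)
    rw [hu, if_pos (by omega)]
    have happ : pvApplyEdge comp (x, y) =
        comp.map (fun c => if c = comp.getD y 0 then comp.getD x 0 else c) := by
      unfold pvApplyEdge
      rw [if_neg hcne]
    rw [happ]
    have good3 : pvGood n (p2.set (pvRoot p y) (pvRoot p x)) :=
      pvGood_link hg2 hrx2 hry2 (by omega) hrxn hryn
    have hroots3 := pvRoot_link hg2 hrx2 hry2 (by omega : pvRoot p x ≠ pvRoot p y) hrxn hryn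
    have hfix3 : ∀ z, (p2.set (pvRoot p y) (pvRoot p x)).getD z z = z ↔
        (p2.getD z z = z ∧ z ≠ pvRoot p y) := by
      intro z
      by_cases hzy : z = pvRoot p y
      · subst hzy
        rw [pvSet_getD_self _ _ (by rw [hg2.1]; exact hryn)]
        constructor
        · intro hc; exact absurd hc hreq
        · intro hc; exact absurd rfl hc.2
      · rw [pvSet_getD_ne _ _ hzy]
        exact ⟨fun hz => ⟨hz, hzy⟩, fun hz => hz.1⟩
    refine ⟨good3, by rw [List.length_set]; exact hsz, by rw [List.length_map]; exact hcl,
      ?_, ?_, ?_⟩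
    -- C6: labels follow roots
    · intro z hz
      have hzl : z < comp.length := by omega
      have hρn : pvRoot p2 z < n := pvRoot_lt hg2 hz
      rw [pvGetD_map_replace _ _ hzl, hroots3 z hz]
      have hlab : comp.getD z 0 = comp.getD (pvRoot p2 z) 0 := inv2.2.2.2.1 z hz
      by_cases hρ : pvRoot p2 z = pvRoot p y
      · rw [if_pos hρ]
        have h1 : comp.getD z 0 = comp.getD y 0 := by rw [hlab, hρ, hcy]
        rw [if_pos h1, pvGetD_map_replace _ _ (by omega : pvRoot p x < comp.length),
            hcx, if_neg hcne]
      · rw [if_neg hρ, pvGetD_map_replace _ _ (by omega : pvRoot p2 z < comp.length), ← hlab]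
    -- C7: distinct roots carry distinct labels
    · intro z w hz hw hfz hfw heq
      obtain ⟨hfz2, hzy⟩ := (hfix3 z).mp hfz
      obtain ⟨hfw2, hwy⟩ := (hfix3 w).mp hfw
      have hzcy : comp.getD z 0 ≠ comp.getD y 0 := by
        intro hc
        exact hzy (inv2.2.2.2.2.1 z (pvRoot p y) hz hryn hfz2 hry2 (by rw [hc, hcy]))
      have hwcy : comp.getD w 0 ≠ comp.getD y 0 := by
        intro hc
        exact hwy (inv2.2.2.2.2.1 w (pvRoot p y) hw hryn hfw2 hry2 (by rw [hc, hcy]))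
      rw [pvGetD_map_replace _ _ (by omega : z < comp.length), if_neg hzcy,
          pvGetD_map_replace _ _ (by omega : w < comp.length), if_neg hwcy] at heq
      exact inv2.2.2.2.2.1 z w hz hw hfz2 hfw2 heq
    -- C8: sizes at roots count the labels
    · intro z hz hfz
      obtain ⟨hfz2, hzy⟩ := (hfix3 z).mp hfz
      have hc8 := inv2.2.2.2.2.2
      by_cases hzx : z = pvRoot p x
      · subst hzx
        rw [pvSet_getD_self _ _ (by omega : pvRoot p x < sz.length),
            pvGetD_map_replace _ _ (by omega : pvRoot p x < comp.length), hcx, if_neg hcne,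
            hc8 _ hrxn hrx2, hc8 _ hryn hry2, hcx, hcy,
            pvCount_replace_target hcne]
        push_cast
        ring
      · rw [pvSet_getD_ne _ _ hzx,
            pvGetD_map_replace _ _ (by omega : z < comp.length)]
        have hvx : comp.getD z 0 ≠ comp.getD x 0 := by
          intro hc
          exact hzx (inv2.2.2.2.2.1 z (pvRoot p x) hz hrxn hfz2 hrx2 (by rw [hc, hcx]))
        have hvy : comp.getD z 0 ≠ comp.getD y 0 := by
          intro hc
          exact hzy (inv2.2.2.2.2.1 z (pvRoot p y) hz hryn hfz2 hry2 (by rw [hc, hcy]))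
        rw [if_neg hvy, hc8 z hz hfz2, pvCount_replace_other hvx hvy]

lemma pvRange_getD (n z : Nat) : (List.range n).getD z z = z := by
  by_cases hz : z < n
  · rw [List.getD_eq_getElem _ _ (by simpa using hz)]
    simp
  · rw [List.getD_eq_default _ _ (by simpa using hz)]

lemma pvInv_init (n : Nat) : pvInv n (List.range n) (List.replicate n (1 : Int)) (List.range n) := by
  have hroot : ∀ z, (List.range n).getD z z = z := pvRange_getD n
  have hrootv : ∀ z, z < n → pvRoot (List.range n) z = z := by
    intro z hz
    show (pvChase _ _ z).getD z = z
    rw [pvChase_of_root (hroot z)]; rfl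
  refine ⟨⟨List.length_range, ?_, ?_⟩, List.length_replicate, List.length_range, ?_, ?_, ?_⟩
  · intro y hy; rw [hroot y]; exact hy
  · intro y _; rw [pvChase_of_root (hroot y)]; rfl
  · intro z hz; rw [hrootv z hz]
  · intro z w hz hw _ _ heq
    have h1 : (List.range n).getD z 0 = z := by
      rw [List.getD_eq_getElem _ _ (by simpa using hz)]; simp
    have h2 : (List.range n).getD w 0 = w := by
      rw [List.getD_eq_getElem _ _ (by simpa using hw)]; simp
    rw [h1, h2] at heq; exact heq
  · intro z hz _
    have h1 : (List.range n).getD z 0 = z := by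
      rw [List.getD_eq_getElem _ _ (by simpa using hz)]; simp
    rw [h1, List.getD_eq_getElem _ _ (by simpa using hz), List.getElem_replicate,
        List.count_eq_one_of_mem List.nodup_range (List.mem_range.mpr hz)]
    rfl

lemma pvFold_inv {n : Nat} : ∀ (es : List (Nat × Nat)) (s : List Nat × List Int) (comp : List Nat),
    pvInv n s.1 s.2 comp → (∀ e ∈ es, e.1 < n ∧ e.2 < n) →
    pvInv n (es.foldl (fun t e => pvUnion t e.1 e.2) s).1
      (es.foldl (fun t e => pvUnion t e.1 e.2) s).2 (es.foldl pvApplyEdge comp) := by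
  intro es
  induction es with
  | nil => intro s comp h _; exact h
  | cons e es ih =>
    intro s comp h hb
    have he := hb e List.mem_cons_self
    have hstep := pvStep_inv (x := e.1) (y := e.2) (p := s.1) (sz := s.2) h he.1 he.2
    simp only [List.foldl_cons]
    exact ih _ _ hstep (fun e' he' => hb e' (List.mem_cons_of_mem e he'))

lemma pvCountFold {n : Nat} {p0 : List Nat} (hg : pvGood n p0) :
    ∀ (l : List Nat) (p : List Nat) (acc : Int), pvEquiv p0 p → (∀ i ∈ l, i < n) →
    (l.foldl (fun acc i =>
        let f := pvFind acc.1 acc.1.length i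
        (f.1, if f.2 = i then acc.2 + 1 else acc.2)) (p, acc)).2 =
      acc + (l.countP (fun i => decide (pvRoot p0 i = i)) : Int) ∧
    pvEquiv p0 (l.foldl (fun acc i =>
        let f := pvFind acc.1 acc.1.length i
        (f.1, if f.2 = i then acc.2 + 1 else acc.2)) (p, acc)).1 := by
  intro l
  induction l with
  | nil => intro p acc he _; exact ⟨by simp, he⟩
  | cons i l ih =>
    intro p acc he hb
    have hi : i < n := hb i List.mem_cons_self
    obtain ⟨s, hsome⟩ := Option.isSome_iff_exists.mp (hg.2.2 i hi)
    have hs : s = pvRoot p0 i :=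
      pvChase_unique (pvChase_mono hsome (pvNR_le p0)) (pvRoot_spec hg hi)
    subst hs
    have hchp : pvChase p p.length i = some (pvRoot p0 i) := by
      rw [he.1]
      exact he.2.1 _ _ _ (pvChase_mono hsome (pvNR_le p0))
    obtain ⟨hsnd, heq2⟩ := pvFind_spec hchp p.length (le_refl _)
    have he' : pvEquiv p0 (pvFind p p.length i).1 := pvEquiv_trans he heq2
    obtain ⟨ihv, ihe⟩ := ih _ ((if (pvFind p p.length i).2 = i then acc + 1 else acc)) he'
      (fun j hj => hb j (List.mem_cons_of_mem i hj))
    refine ⟨?_, ?_⟩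
    · simp only [List.foldl_cons, List.countP_cons]
      rw [ihv]
      simp only [hsnd]
      by_cases hroot : pvRoot p0 i = i
      · rw [if_pos hroot]
        simp only [hroot, decide_true]
        push_cast
        ring
      · rw [if_neg hroot]
        simp only [hroot, decide_false]
        push_cast
        ring
    · simp only [List.foldl_cons]
      exact ihe

lemma pvMaxFold {n : Nat} {p0 : List Nat} (hg : pvGood n p0) (sz : List Int) :
    ∀ (l : List Nat) (p : List Nat) (acc : Int), pvEquiv p0 p → (∀ i ∈ l, i < n) →
    (l.foldl (fun acc i =>
        let f := pvFind acc.1 acc.1.length i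
        (f.1, if f.2 = i then max acc.2 (sz.getD i 0) else acc.2)) (p, acc)).2 =
      l.foldl (fun a i => if pvRoot p0 i = i then max a (sz.getD i 0) else a) acc := by
  intro l
  induction l with
  | nil => intro p acc _ _; simp
  | cons i l ih =>
    intro p acc he hb
    have hi : i < n := hb i List.mem_cons_self
    obtain ⟨s, hsome⟩ := Option.isSome_iff_exists.mp (hg.2.2 i hi)
    have hs : s = pvRoot p0 i :=
      pvChase_unique (pvChase_mono hsome (pvNR_le p0)) (pvRoot_spec hg hi)
    subst hs
    have hchp : pvChase p p.length i = some (pvRoot p0 i) := by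
      rw [he.1]
      exact he.2.1 _ _ _ (pvChase_mono hsome (pvNR_le p0))
    obtain ⟨hsnd, heq2⟩ := pvFind_spec hchp p.length (le_refl _)
    have he' : pvEquiv p0 (pvFind p p.length i).1 := pvEquiv_trans he heq2
    simp only [List.foldl_cons]
    rw [ih _ _ he' (fun j hj => hb j (List.mem_cons_of_mem i hj))]
    simp only [hsnd]

-- the labels at the roots enumerate the distinct labels, injectively
lemma pvLabelPerm {n : Nat} {p : List Nat} {sz : List Int} {comp : List Nat}
    (h : pvInv n p sz comp) :
    (((List.range n).filter (fun i => decide (p.getD i i = i))).map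
        (fun i => comp.getD i 0)).Perm (PySem.Set.ofList comp) := by
  have hg := h.1
  have hcl : comp.length = n := h.2.2.1
  have hnd1 : (((List.range n).filter (fun i => decide (p.getD i i = i))).map
      (fun i => comp.getD i 0)).Nodup := by
    apply List.Nodup.map_on
    · intro a ha b hb heq
      have ha' := List.mem_filter.mp ha
      have hb' := List.mem_filter.mp hb
      exact h.2.2.2.2.1 a b (List.mem_range.mp ha'.1) (List.mem_range.mp hb'.1)
        (of_decide_eq_true ha'.2) (of_decide_eq_true hb'.2) heq
    · exact List.Nodup.filter _ List.nodup_range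
  rw [List.perm_ext_iff_of_nodup hnd1 (PySem.Set.nodup_ofList comp)]
  intro v
  rw [PySem.Set.mem_ofList]
  constructor
  · intro hv
    obtain ⟨i, hi, hvi⟩ := List.mem_map.mp hv
    have hi' := List.mem_filter.mp hi
    have hin : i < n := List.mem_range.mp hi'.1
    rw [← hvi, List.getD_eq_getElem _ _ (by omega)]
    exact List.getElem_mem _
  · intro hv
    obtain ⟨k, hk, hvk⟩ := List.mem_iff_getElem.mp hv
    have hkn : k < n := by omega
    apply List.mem_map.mpr
    refine ⟨pvRoot p k, ?_, ?_⟩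
    · apply List.mem_filter.mpr
      exact ⟨List.mem_range.mpr (pvRoot_lt hg hkn),
        decide_eq_true (pvRoot_root hg hkn)⟩
    · rw [← h.2.2.2.1 k hkn, List.getD_eq_getElem _ _ (by omega), hvk]

lemma pvGroups_eq {n : Nat} {p : List Nat} {sz : List Int} {comp : List Nat}
    (h : pvInv n p sz comp) :
    (List.range n).countP (fun i => decide (pvRoot p i = i)) =
      (PySem.Set.ofList comp).length := by
  have hcongr : (List.range n).countP (fun i => decide (pvRoot p i = i)) =
      (List.range n).countP (fun i => decide (p.getD i i = i)) := by
    apply List.countP_congr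
    intro i hi
    simpa using pvRoot_eq_self_iff h.1 (List.mem_range.mp hi)
  rw [hcongr, List.countP_eq_length_filter, ← (pvLabelPerm h).length_eq, List.length_map]

lemma pvMax_eq {n : Nat} {p : List Nat} {sz : List Int} {comp : List Nat}
    (h : pvInv n p sz comp) :
    (List.range n).foldl (fun a i => if pvRoot p i = i then max a (sz.getD i 0) else a) 0 =
      ((PySem.Set.ofList comp).map (fun v => (comp.count v : Int))).foldl max 0 := by
  have hg := h.1
  rw [PySem.List.foldl_congr_mem (List.range n) _
      (fun a i => if p.getD i i = i then max a (sz.getD i 0) else a) 0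
      (by
        intro acc i hi
        have hiff : (pvRoot p i = i) ↔ (p.getD i i = i) :=
          pvRoot_eq_self_iff hg (List.mem_range.mp hi)
        simp only [hiff])]
  rw [PySem.List.foldl_ite_eq_foldl_filter (fun i => p.getD i i = i)
      (fun a i => max a (sz.getD i 0)) (List.range n) 0]
  rw [PySem.List.foldl_congr_mem _ _
      (fun a i => max a ((comp.count (comp.getD i 0) : Int))) 0
      (by
        intro acc i hi
        have hi' := List.mem_filter.mp hi
        rw [h.2.2.2.2.2 i (List.mem_range.mp hi'.1) (of_decide_eq_true hi'.2)])]
  calc (List.filter (fun x => decide (p.getD x x = x)) (List.range n)).foldl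
        (fun a i => max a ((comp.count (comp.getD i 0) : Int))) 0
      = ((List.filter (fun x => decide (p.getD x x = x)) (List.range n)).map
          (fun j => comp.getD j 0)).foldl
          (fun a v => max a ((comp.count v : Int))) 0 :=
        (List.foldl_map (f := fun j => comp.getD j 0)
          (g := fun a v => max a ((comp.count v : Int)))).symm
    _ = (PySem.Set.ofList comp).foldl (fun a v => max a ((comp.count v : Int))) 0 :=
        @List.Perm.foldl_eq _ _ _ _ _ ⟨fun b a1 a2 => by omega⟩ (pvLabelPerm h) 0
    _ = ((PySem.Set.ofList comp).map (fun v => (comp.count v : Int))).foldl max 0 :=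
        (List.foldl_map (f := fun v => (comp.count v : Int)) (g := max)).symm

-- ===== fusion lemmas =====
lemma pvCond (m b : Nat) : (m &&& (1 <<< b) ≠ 0) ↔ (m >>> b &&& 1 = 1) := by
  rw [Nat.shiftLeft_eq, one_mul, Nat.and_two_pow, Nat.and_one_is_mod, Nat.shiftRight_eq_div_pow,
      Nat.testBit, Nat.shiftRight_eq_div_pow, Nat.one_and_eq_mod_two]
  rcases Nat.mod_two_eq_zero_or_one (m / 2 ^ b) with h | h <;> simp [h, Nat.pow_pos]

lemma pvXor_ne (m b : Nat) (h : m &&& (1 <<< b) ≠ 0) : m ^^^ (1 <<< b) ≠ m := by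
  intro hc
  have := congrArg (fun z => z ^^^ m) hc
  simp [Nat.xor_comm, ← Nat.xor_assoc] at this

lemma pvXor_inj {m b b' : Nat} (h : m ^^^ (1 <<< b) = m ^^^ (1 <<< b')) : b = b' := by
  have h2 : (1:Nat) <<< b = 1 <<< b' := by
    have := congrArg (fun z => m ^^^ z) h
    simpa [← Nat.xor_assoc] using this
  rw [Nat.shiftLeft_eq, Nat.shiftLeft_eq, one_mul, one_mul] at h2
  exact Nat.pow_right_injective (by omega) h2

lemma pvShift_foldl (step : PvStB → Nat → PvStB)
    (hstep : ∀ m d es b, step (m, d, es) b =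
      ((step (m, d, []) b).1, (step (m, d, []) b).2.1, es ++ (step (m, d, []) b).2.2)) :
    ∀ (l : List Nat) (m : PySem.Dict Nat Nat) (d : PySem.Dict Nat Nat) (es : List (Nat × Nat)),
    l.foldl step (m, d, es) =
      ((l.foldl step (m, d, [])).1, (l.foldl step (m, d, [])).2.1,
        es ++ (l.foldl step (m, d, [])).2.2) := by
  intro l
  induction l with
  | nil => intro m d es; simp
  | cons b l ih =>
    intro m d es
    simp only [List.foldl_cons]
    rw [hstep m d es b, hstep m d [] b, List.nil_append]
    rw [ih (step (m, d, []) b).1 (step (m, d, []) b).2.1 (es ++ (step (m, d, []) b).2.2),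
        ih (step (m, d, []) b).1 (step (m, d, []) b).2.1 (step (m, d, []) b).2.2]
    simp [List.append_assoc]

lemma pvBitB_shift (i mask : Nat) : ∀ (m d : PySem.Dict Nat Nat) (es : List (Nat × Nat)) (b : Nat),
    pvBitB i mask (m, d, es) b =
      ((pvBitB i mask (m, d, []) b).1, (pvBitB i mask (m, d, []) b).2.1,
        es ++ (pvBitB i mask (m, d, []) b).2.2) := by
  intro m d es b
  unfold pvBitB
  by_cases hc : mask >>> b &&& 1 = 1
  · simp only [if_pos hc]
    cases hg : m.get? (mask ^^^ (1 <<< b)) <;>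
      by_cases hsd : (pvSetdefault d (mask ^^^ (1 <<< b)) i).2 ≠ i <;>
        simp [hg, hsd]
  · simp only [if_neg hc]
    simp

lemma pvBitsFuse (i mask : Nat) : ∀ (bs : List Nat), bs.Nodup →
    ∀ (s : List Nat × List Int) (m d : PySem.Dict Nat Nat),
    (∀ k v, m.get? k = some v → v < i ∨ k = mask) →
    (∀ b' ∈ bs, ∀ v, d.get? (mask ^^^ (1 <<< b')) = some v → v < i) →
    (∀ k v, d.get? k = some v → v ≤ i) →
    (bs.foldl (pvBitA i mask) (s, m, d) =
      ((bs.foldl (pvBitB i mask) (m, d, [])).2.2.foldl (fun t e => pvUnion t e.1 e.2) s,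
       (bs.foldl (pvBitB i mask) (m, d, [])).1,
       (bs.foldl (pvBitB i mask) (m, d, [])).2.1)) ∧
    (bs.foldl (pvBitB i mask) (m, d, [])).1 = m ∧
    (∀ k v, (bs.foldl (pvBitB i mask) (m, d, [])).2.1.get? k = some v → v ≤ i) ∧
    (∀ e ∈ (bs.foldl (pvBitB i mask) (m, d, [])).2.2, e.2 < e.1 ∧ e.1 = i) := by
  intro bs
  induction bs with
  | nil =>
    intro _ s m d _ _ hdle
    refine ⟨rfl, rfl, ?_, ?_⟩
    · intro k v h; exact hdle k v h
    · intro e he; cases he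
  | cons b bs ih =>
    intro hnd s m d hm hd hdle
    have hndtail : bs.Nodup := (List.nodup_cons.mp hnd).2
    have hbnotin : b ∉ bs := (List.nodup_cons.mp hnd).1
    simp only [List.foldl_cons]
    by_cases hc : mask &&& (1 <<< b) ≠ 0
    · have hc' : mask >>> b &&& 1 = 1 := (pvCond mask b).mp hc
      have hdm : mask ^^^ (1 <<< b) ≠ mask := pvXor_ne mask b hc
      have hshift := pvShift_foldl (pvBitB i mask) (pvBitB_shift i mask) bs
      -- one subcase per pair of bucket lookups
      cases hgm : m.get? (mask ^^^ (1 <<< b)) with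
      | some j' =>
        have hj' : j' < i := by
          rcases hm _ _ hgm with h | h
          · exact h
          · exact absurd h hdm
        cases hgd : d.get? (mask ^^^ (1 <<< b)) with
        | some j =>
          have hj : j < i := hd b List.mem_cons_self j hgd
          have stepA : pvBitA i mask (s, m, d) b = (pvUnion (pvUnion s i j') i j, m, d) := by
            simp only [pvBitA, if_pos hc, hgd, hgm]
          have stepB : pvBitB i mask (m, d, []) b = (m, d, [(i, j'), (i, j)]) := by
            simp only [pvBitB, if_pos hc', pvSetdefault, hgd, hgm]
            rw [if_pos (by omega : j ≠ i)]
            rfl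
          rw [stepA, stepB, hshift m d [(i, j'), (i, j)]]
          obtain ⟨ha, hb1, hb2, hb3⟩ := ih hndtail (pvUnion (pvUnion s i j') i j) m d hm
            (fun b' hb' => hd b' (List.mem_cons_of_mem b hb')) hdle
          rw [ha]
          refine ⟨by rw [List.foldl_append]; rfl, hb1, hb2, ?_⟩
          intro e he
          rcases List.mem_append.mp he with he | he
          · simp only [List.mem_cons, List.not_mem_nil, or_false] at he
            rcases he with rfl | rfl
            · exact ⟨hj', rfl⟩
            · exact ⟨hj, rfl⟩
          · exact hb3 e he
        | none =>
          have stepA : pvBitA i mask (s, m, d) b =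
              (pvUnion s i j', m, d.insert (mask ^^^ (1 <<< b)) i) := by
            simp only [pvBitA, if_pos hc, hgd, hgm]
          have stepB : pvBitB i mask (m, d, []) b =
              (m, d.insert (mask ^^^ (1 <<< b)) i, [(i, j')]) := by
            simp only [pvBitB, if_pos hc', pvSetdefault, hgd, hgm]
            simp
          rw [stepA, stepB, hshift m (d.insert (mask ^^^ (1 <<< b)) i) [(i, j')]]
          obtain ⟨ha, hb1, hb2, hb3⟩ := ih hndtail (pvUnion s i j') m
            (d.insert (mask ^^^ (1 <<< b)) i) hm
            (fun b' hb' v hv => by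
              have hne : mask ^^^ (1 <<< b') ≠ mask ^^^ (1 <<< b) := fun c =>
                hbnotin (pvXor_inj c ▸ hb')
              rw [PySem.Dict.get?_insert_of_ne _ _ hne] at hv
              exact hd b' (List.mem_cons_of_mem b hb') v hv)
            (fun k v hv => by
              by_cases hk : k = mask ^^^ (1 <<< b)
              · subst hk
                rw [PySem.Dict.get?_insert_self] at hv
                cases hv; omega
              · rw [PySem.Dict.get?_insert_of_ne _ _ hk] at hv
                exact hdle k v hv)
          rw [ha]
          refine ⟨by rw [List.foldl_append]; rfl, hb1, hb2, ?_⟩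
          intro e he
          rcases List.mem_append.mp he with he | he
          · simp only [List.mem_cons, List.not_mem_nil, or_false] at he
            rcases he with rfl | rfl
            exact ⟨hj', rfl⟩
          · exact hb3 e he
      | none =>
        cases hgd : d.get? (mask ^^^ (1 <<< b)) with
        | some j =>
          have hj : j < i := hd b List.mem_cons_self j hgd
          have stepA : pvBitA i mask (s, m, d) b = (pvUnion s i j, m, d) := by
            simp only [pvBitA, if_pos hc, hgd, hgm]
          have stepB : pvBitB i mask (m, d, []) b = (m, d, [(i, j)]) := by
            simp only [pvBitB, if_pos hc', pvSetdefault, hgd, hgm]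
            rw [if_pos (by omega : j ≠ i)]
            rfl
          rw [stepA, stepB, hshift m d [(i, j)]]
          obtain ⟨ha, hb1, hb2, hb3⟩ := ih hndtail (pvUnion s i j) m d hm
            (fun b' hb' => hd b' (List.mem_cons_of_mem b hb')) hdle
          rw [ha]
          refine ⟨by rw [List.foldl_append]; rfl, hb1, hb2, ?_⟩
          intro e he
          rcases List.mem_append.mp he with he | he
          · simp only [List.mem_cons, List.not_mem_nil, or_false] at he
            rcases he with rfl | rfl
            exact ⟨hj, rfl⟩
          · exact hb3 e he
        | none =>
          have stepA : pvBitA i mask (s, m, d) b =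
              (s, m, d.insert (mask ^^^ (1 <<< b)) i) := by
            simp only [pvBitA, if_pos hc, hgd, hgm]
          have stepB : pvBitB i mask (m, d, []) b =
              (m, d.insert (mask ^^^ (1 <<< b)) i, []) := by
            simp only [pvBitB, if_pos hc', pvSetdefault, hgd, hgm]
            simp
          rw [stepA, stepB]
          exact ih hndtail s m (d.insert (mask ^^^ (1 <<< b)) i) hm
            (fun b' hb' v hv => by
              have hne : mask ^^^ (1 <<< b') ≠ mask ^^^ (1 <<< b) := fun c =>
                hbnotin (pvXor_inj c ▸ hb')
              rw [PySem.Dict.get?_insert_of_ne _ _ hne] at hv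
              exact hd b' (List.mem_cons_of_mem b hb') v hv)
            (fun k v hv => by
              by_cases hk : k = mask ^^^ (1 <<< b)
              · subst hk
                rw [PySem.Dict.get?_insert_self] at hv
                cases hv; omega
              · rw [PySem.Dict.get?_insert_of_ne _ _ hk] at hv
                exact hdle k v hv)
    · have hc' : ¬(mask >>> b &&& 1 = 1) := fun c => hc ((pvCond mask b).mpr c)
      have hA : pvBitA i mask (s, m, d) b = (s, m, d) := by
        unfold pvBitA; rw [if_neg hc]
      have hB : pvBitB i mask (m, d, []) b = (m, d, []) := by
        unfold pvBitB; rw [if_neg hc']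
      rw [hA, hB]
      exact ih hndtail s m d hm (fun b' hb' => hd b' (List.mem_cons_of_mem b hb')) hdle

lemma pvWordB_shift (masks : List Nat) : ∀ (m d : PySem.Dict Nat Nat) (es : List (Nat × Nat)) (i : Nat),
    pvWordB masks (m, d, es) i =
      ((pvWordB masks (m, d, []) i).1, (pvWordB masks (m, d, []) i).2.1,
        es ++ (pvWordB masks (m, d, []) i).2.2) := by
  intro m d es i
  unfold pvWordB
  cases hgm : m.get? (masks.getD i 0) with
  | some j =>
    simp only [pvSetdefault, hgm]
    by_cases hji : j ≠ i
    · rw [if_pos hji, if_pos hji,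
          pvShift_foldl (pvBitB i (masks.getD i 0)) (pvBitB_shift i (masks.getD i 0))
            (List.range 26) m d (es ++ [(i, j)]),
          pvShift_foldl (pvBitB i (masks.getD i 0)) (pvBitB_shift i (masks.getD i 0))
            (List.range 26) m d ([] ++ [(i, j)])]
      simp
    · rw [if_neg hji, if_neg hji,
          pvShift_foldl (pvBitB i (masks.getD i 0)) (pvBitB_shift i (masks.getD i 0))
            (List.range 26) m d es]
  | none =>
    simp only [pvSetdefault, hgm]
    simp only [ne_eq, not_true_eq_false, if_false, ite_self]
    rw [pvShift_foldl (pvBitB i (masks.getD i 0)) (pvBitB_shift i (masks.getD i 0))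
          (List.range 26) (m.insert (masks.getD i 0) i) d es]

lemma pvWordB_shift' (masks : List Nat) (l : List Nat) (st : PvStB) :
    l.foldl (pvWordB masks) st =
      ((l.foldl (pvWordB masks) (st.1, st.2.1, [])).1,
       (l.foldl (pvWordB masks) (st.1, st.2.1, [])).2.1,
       st.2.2 ++ (l.foldl (pvWordB masks) (st.1, st.2.1, [])).2.2) := by
  obtain ⟨m, d, es⟩ := st
  exact pvShift_foldl (pvWordB masks) (pvWordB_shift masks) l m d es

lemma pvWordFuse (masks : List Nat) (i : Nat) (s : List Nat × List Int)
    (m d : PySem.Dict Nat Nat)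
    (hm : ∀ k v, m.get? k = some v → v < i) (hd : ∀ k v, d.get? k = some v → v < i) :
    (pvWordA masks (s, m, d) i =
      ((pvWordB masks (m, d, []) i).2.2.foldl (fun t e => pvUnion t e.1 e.2) s,
       (pvWordB masks (m, d, []) i).1, (pvWordB masks (m, d, []) i).2.1)) ∧
    (∀ k v, (pvWordB masks (m, d, []) i).1.get? k = some v → v ≤ i) ∧
    (∀ k v, (pvWordB masks (m, d, []) i).2.1.get? k = some v → v ≤ i) ∧
    (∀ e ∈ (pvWordB masks (m, d, []) i).2.2, e.2 < e.1 ∧ e.1 = i) := by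
  unfold pvWordA pvWordB
  cases hgm : m.get? (masks.getD i 0) with
  | some j =>
    have hji : j < i := hm _ _ hgm
    simp only [pvSetdefault, hgm]
    rw [if_pos (by omega : j ≠ i)]
    obtain ⟨ha, hb1, hb2, hb3⟩ := pvBitsFuse i (masks.getD i 0) (List.range 26)
      List.nodup_range (pvUnion s i j) m d
      (fun k v hv => Or.inl (hm k v hv))
      (fun b' _ v hv => hd _ v hv)
      (fun k v hv => le_of_lt (hd k v hv))
    rw [pvShift_foldl (pvBitB i (masks.getD i 0)) (pvBitB_shift i (masks.getD i 0))
          (List.range 26) m d ([] ++ [(i, j)]), ha]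
    simp only [List.nil_append]
    refine ⟨by rw [List.foldl_append]; rfl, ?_, hb2, ?_⟩
    · intro k v hv
      rcases hm k v ((hb1 ▸ hv : m.get? k = some v)) with h
      omega
    · intro e he
      rcases List.mem_cons.mp he with rfl | he
      · exact ⟨hji, rfl⟩
      · exact hb3 e he
  | none =>
    simp only [pvSetdefault, hgm]
    simp only [ne_eq, not_true_eq_false, if_false, ite_self]
    obtain ⟨ha, hb1, hb2, hb3⟩ := pvBitsFuse i (masks.getD i 0) (List.range 26)
      List.nodup_range s (m.insert (masks.getD i 0) i) d
      (fun k v hv => by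
        by_cases hk : k = masks.getD i 0
        · subst hk
          exact Or.inr rfl
        · rw [PySem.Dict.get?_insert_of_ne _ _ hk] at hv
          exact Or.inl (hm k v hv))
      (fun b' _ v hv => hd _ v hv)
      (fun k v hv => le_of_lt (hd k v hv))
    rw [ha]
    refine ⟨rfl, ?_, hb2, hb3⟩
    intro k v hv
    rw [hb1] at hv
    by_cases hk : k = masks.getD i 0
    · subst hk
      rw [PySem.Dict.get?_insert_self] at hv
      cases hv; omega
    · rw [PySem.Dict.get?_insert_of_ne _ _ hk] at hv
      exact le_of_lt (hm k v hv)

lemma pvAllFuse (masks : List Nat) : ∀ (l : List Nat), l.Pairwise (· < ·) →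
    ∀ (s : List Nat × List Int) (m d : PySem.Dict Nat Nat),
    (∀ k v, m.get? k = some v → ∀ i ∈ l, v < i) →
    (∀ k v, d.get? k = some v → ∀ i ∈ l, v < i) →
    (l.foldl (pvWordA masks) (s, m, d) =
      ((l.foldl (pvWordB masks) (m, d, [])).2.2.foldl (fun t e => pvUnion t e.1 e.2) s,
       (l.foldl (pvWordB masks) (m, d, [])).1, (l.foldl (pvWordB masks) (m, d, [])).2.1)) ∧
    (∀ e ∈ (l.foldl (pvWordB masks) (m, d, [])).2.2, e.2 < e.1 ∧ e.1 ∈ l) := by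
  intro l
  induction l with
  | nil =>
    intro _ s m d _ _
    exact ⟨rfl, fun e he => absurd he (List.not_mem_nil)⟩
  | cons i l ih =>
    intro hpw s m d hm hd
    have hpw' : l.Pairwise (· < ·) := (List.pairwise_cons.mp hpw).2
    have hlt : ∀ j ∈ l, i < j := (List.pairwise_cons.mp hpw).1
    simp only [List.foldl_cons]
    obtain ⟨ha, hm1, hd1, hes1⟩ := pvWordFuse masks i s m d
      (fun k v hv => hm k v hv i List.mem_cons_self)
      (fun k v hv => hd k v hv i List.mem_cons_self)
    rw [ha]
    obtain ⟨ha2, hes2⟩ := ih hpw'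
      ((pvWordB masks (m, d, []) i).2.2.foldl (fun t e => pvUnion t e.1 e.2) s)
      (pvWordB masks (m, d, []) i).1 (pvWordB masks (m, d, []) i).2.1
      (fun k v hv j hj => lt_of_le_of_lt (hm1 k v hv) (hlt j hj))
      (fun k v hv j hj => lt_of_le_of_lt (hd1 k v hv) (hlt j hj))
    rw [pvWordB_shift' masks l (pvWordB masks (m, d, []) i)]
    rw [ha2]
    refine ⟨by rw [List.foldl_append], ?_⟩
    intro e he
    rcases List.mem_append.mp he with he | he
    · obtain ⟨h1, h2⟩ := hes1 e he
      exact ⟨h1, h2 ▸ List.mem_cons_self⟩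
    · obtain ⟨h1, h2⟩ := hes2 e he
      exact ⟨h1, List.mem_cons_of_mem i h2⟩
lemma pvMain (words : List String) : reference_py words = reference_py_alt words := by
  unfold reference_py reference_py_alt
  simp only []
  set n := words.length with hn
  set masks := words.map pvMask with hmasks
  obtain ⟨hfuse, hedges⟩ := pvAllFuse masks (List.range n) List.pairwise_lt_range
    (List.range n, List.replicate n (1 : Int)) PySem.Dict.empty PySem.Dict.empty
    (fun k v hv => by rw [PySem.Dict.get?_empty] at hv; cases hv)
    (fun k v hv => by rw [PySem.Dict.get?_empty] at hv; cases hv)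
  rw [hfuse]
  set G := (List.range n).foldl (pvWordB masks) (PySem.Dict.empty, PySem.Dict.empty, []) with hG
  set comp := G.2.2.foldl pvApplyEdge (List.range n) with hcomp
  have hinv : pvInv n (G.2.2.foldl (fun t e => pvUnion t e.1 e.2)
        (List.range n, List.replicate n (1 : Int))).1
      (G.2.2.foldl (fun t e => pvUnion t e.1 e.2)
        (List.range n, List.replicate n (1 : Int))).2 comp := by
    apply pvFold_inv G.2.2 _ _ (pvInv_init n)
    intro e he
    obtain ⟨h1, h2⟩ := hedges e he
    have : e.1 < n := List.mem_range.mp h2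
    omega
  set p0 := (G.2.2.foldl (fun t e => pvUnion t e.1 e.2)
      (List.range n, List.replicate n (1 : Int))).1 with hp0
  set sz0 := (G.2.2.foldl (fun t e => pvUnion t e.1 e.2)
      (List.range n, List.replicate n (1 : Int))).2 with hsz0
  have hg : pvGood n p0 := hinv.1
  obtain ⟨hcval, hcequiv⟩ := pvCountFold hg (List.range n) p0 0 (pvEquiv_refl p0)
    (fun i hi => List.mem_range.mp hi)
  have hmval := pvMaxFold hg sz0 (List.range n)
    ((List.range n).foldl (fun acc i =>
      let f := pvFind acc.1 acc.1.length i
      (f.1, if f.2 = i then acc.2 + 1 else acc.2)) (p0, (0 : Int))).1 0 hcequiv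
    (fun i hi => List.mem_range.mp hi)
  rw [hcval, hmval, zero_add]
  -- B side: the counting dict is Counter(comp)
  rw [PySem.Dict.foldl_insert_getD_add_one_eq_counter comp]
  congr 1
  · -- number of groups
    rw [pvGroups_eq hinv]
    show _ = ((PySem.Dict.counter comp).items.length : Int)
    rw [PySem.Dict.items_counter, List.length_map]
  · -- max group size
    congr 1
    rw [pvMax_eq hinv]
    show ((PySem.Set.ofList comp).map (fun v => (comp.count v : Int))).foldl max 0 =
      (PySem.Dict.counter comp).values.foldl max 0
    have hvals : (PySem.Dict.counter comp).values =
        (PySem.Set.ofList comp).map (fun v => (comp.count v : Int)) := by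
      show (PySem.Dict.counter comp).items.map (·.2) = _
      rw [PySem.Dict.items_counter, List.map_map]
      rfl
    rw [hvals]

-- ===== VERDICT (by name: the statement is the Claim_ definition above) =====
theorem reference_py_spec : Claim_equal_reference_py := by
  intro words _ _
  exact pvMain words
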